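-- pv_equiv track=rewrite | github.com/Ukropchick/pythonProject6 | tutorial/dictionary.py | build_grades
-- ===== SOURCE A (Python) =====
-- def build_grades(grades: dict) -> dict:
--     revers = {}
--
--     for name in grades:
--         grade = grades[name]
--         if not (grade in revers):
--             revers[grade] = list()
--         revers[grade].append(name)
--     return revers
-- ===== SOURCE B (Python) =====
-- def build_grades(grades: dict) -> dict:
--     order = dict.fromkeys(grades.values())
--     return {g: [n for n, v in grades.items() if v == g] for g in order}
-- ===== Notes on version B (the rewrite author's own statement) =====
-- stated objective: alternative
-- what changed: Replaces A's single mutating pass (membership test + create-empty-list-then-append per name) by a two-phase scheme: first dedupe the grade values in first-seen order with dict.fromkeys, then build the result with one filtering comprehension per distinct grade; Pre_ excludes association lists with duplicate names, which do not encode any Python dict input.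
import Mathlib
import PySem

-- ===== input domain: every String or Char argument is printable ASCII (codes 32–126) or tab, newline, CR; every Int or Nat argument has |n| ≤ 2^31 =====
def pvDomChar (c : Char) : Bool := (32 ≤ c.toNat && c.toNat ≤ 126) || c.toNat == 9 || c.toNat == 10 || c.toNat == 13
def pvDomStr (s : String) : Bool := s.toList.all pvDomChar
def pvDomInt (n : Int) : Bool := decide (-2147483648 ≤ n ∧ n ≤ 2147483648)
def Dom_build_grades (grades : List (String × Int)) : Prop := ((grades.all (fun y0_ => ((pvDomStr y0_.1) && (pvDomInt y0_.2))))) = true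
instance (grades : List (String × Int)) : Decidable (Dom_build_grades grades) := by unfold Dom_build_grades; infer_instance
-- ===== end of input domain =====

-- B groups names by first deduping the grade values (first-seen order) and then collecting
-- each grade's names with a filtering pass, instead of A's single mutating dict-append pass.


-- ===== PORT A =====
-- for name in grades: grade = grades[name]; if grade not in revers: revers[grade] = []; revers[grade].append(name)
def build_grades (grades : List (String × Int)) : List (Int × List String) :=
  (grades.foldl (fun revers p =>
      let name := p.1
      let grade := (PySem.Dict.mk grades).getD name 0   -- grades[name]; key always present, default unreachable
      let revers := if revers.contains grade then revers
                    else revers.insert grade ([] : List String)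
      revers.modify grade [] (fun l => l ++ [name]))
    PySem.Dict.empty).items

-- ===== PORT B =====
-- order = dict.fromkeys(grades.values()); {g: [n for n, v in grades.items() if v == g] for g in order}
def build_grades_alt (grades : List (String × Int)) : List (Int × List String) :=
  let order := PySem.Set.ofList (grades.map Prod.snd)
  order.map (fun g => (g, (grades.filter (fun p => p.2 == g)).map Prod.fst))

-- ===== PRECONDITION & SPEC =====
-- Pre_ excludes association lists with duplicate names: the Python parameter is a dict, whose
-- keys are necessarily distinct, so such lists encode no input the Python function can receive.
def Pre_build_grades (grades : List (String × Int)) : Prop := (grades.map Prod.fst).Nodup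
instance (grades : List (String × Int)) : Decidable (Pre_build_grades grades) := by unfold Pre_build_grades; infer_instance
def pvWitness_build_grades : (List (String × Int)) := [("bob", 3), ("ann", 3), ("joe", 5)]

def Spec_build_grades (grades : List (String × Int)) (out : List (Int × List String)) : Prop := out = build_grades_alt grades
instance (grades : List (String × Int)) (out : List (Int × List String)) : Decidable (Spec_build_grades grades out) := by unfold Spec_build_grades; infer_instance

-- ===== CLAIM (what is proved, stated in full; the proofs are below) =====
def Claim_equal_build_grades : Prop := ∀ (grades : List (String × Int)), Dom_build_grades grades → Pre_build_grades grades → Spec_build_grades grades (build_grades grades)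

-- ===== LEMMAS AND PROOFS =====

-- overwriting a freshly inserted key is the same as inserting the final value
lemma insert_insert_fresh (d : PySem.Dict Int (List String)) (k : Int) (v w : List String)
    (h : d.contains k = false) : (d.insert k v).insert k w = d.insert k w := by
  have hmem : ∀ p ∈ d.items, (p.1 == k) = false := by
    intro p hp
    have h' : d.items.any (fun p => p.1 == k) = false := h
    simpa using List.any_eq_false.mp h' p hp
  apply PySem.Dict.ext
  rw [PySem.Dict.items_insert_of_contains _ w (PySem.Dict.contains_insert_self d k v),
      PySem.Dict.items_insert_of_not_contains _ v h,
      PySem.Dict.items_insert_of_not_contains _ w h,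
      List.map_append]
  have h1 : List.map (fun p => if (p.1 == k) = true then (k, w) else p) d.items = d.items := by
    conv_rhs => rw [← List.map_id d.items]
    exact List.map_congr_left (fun p hp => by rw [hmem p hp]; simp)
  rw [h1]
  simp

-- inserting the fresh empty list and then appending is one modify
lemma stepA_eq (d : PySem.Dict Int (List String)) (k : Int) (name : String) :
    (if d.contains k then d else d.insert k ([] : List String)).modify k [] (fun l => l ++ [name])
      = d.modify k [] (fun l => l ++ [name]) := by
  by_cases h : d.contains k = true
  · simp [h]
  · have h' : d.contains k = false := by simpa using h
    rw [if_neg h]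
    simp only [PySem.Dict.modify, PySem.Dict.getD_insert_self,
      PySem.Dict.getD_of_not_contains d _ h']
    exact insert_insert_fresh d k [] ([] ++ [name]) h'

-- items of a dict with distinct keys is keys paired with their looked-up values
lemma items_eq_keys_map {κ ν : Type} [BEq κ] [LawfulBEq κ] (d : PySem.Dict κ ν)
    (h : d.keys.Nodup) (d0 : ν) :
    d.items = d.keys.map (fun k => (k, d.getD k d0)) := by
  have h2 : d.keys.map (fun k => (k, d.getD k d0)) = d.items.map (fun p => (p.1, d.getD p.1 d0)) := by
    simp [PySem.Dict.keys, List.map_map, Function.comp_def]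
  rw [h2]
  have h3 : d.items.map (fun p => (p.1, d.getD p.1 d0)) = d.items.map id :=
    List.map_congr_left (fun p hp => by
      rw [PySem.Dict.getD_of_mem_items d (k := p.1) (v := p.2) (by simpa using hp) h d0]
      simp)
  rw [h3, List.map_id]

-- the plain grouping fold (keyed by the second component) computes B
lemma fold_simple_eq (grades : List (String × Int)) :
    (grades.foldl (fun d p => d.modify p.2 [] (fun l => l ++ [p.1]))
        (PySem.Dict.empty : PySem.Dict Int (List String))).items
      = build_grades_alt grades := by
  set D := grades.foldl (fun d p => d.modify p.2 [] (fun l => l ++ [p.1]))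
      (PySem.Dict.empty : PySem.Dict Int (List String)) with hD
  have hswap : D = (grades.map Prod.swap).foldl
      (fun d p => d.modify p.1 [] (fun l => l ++ [p.2])) PySem.Dict.empty := by
    rw [hD, List.foldl_map]
    rfl
  have hkeys : D.keys = PySem.Set.ofList (grades.map Prod.snd) := by
    rw [hswap]
    rw [PySem.Dict.keys_foldl_modify_key (grades.map Prod.swap) Prod.fst ([] : List String)
        (fun _ p l => l ++ [p.2]) PySem.Dict.empty]
    rw [PySem.Dict.keys_empty, PySem.Set.update_nil_left, List.map_map]
    rfl
  have hget : ∀ c : Int, D.getD c [] = (grades.filter (fun p => p.2 == c)).map Prod.fst := by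
    intro c
    rw [hswap, PySem.Dict.getD_foldl_modify_append]
    rw [List.filter_map, PySem.Dict.getD_empty, List.map_map]
    rfl
  have hnodup : D.keys.Nodup := by rw [hkeys]; exact PySem.Set.nodup_ofList _
  rw [items_eq_keys_map D hnodup ([] : List String), hkeys]
  unfold build_grades_alt
  apply List.map_congr_left
  intro g _
  rw [hget g]

-- under Pre_, the dict lookup grades[name] at entry (name, v) returns v
lemma lookup_eq (grades : List (String × Int)) (h : Pre_build_grades grades) :
    ∀ p ∈ grades, (PySem.Dict.mk grades).getD p.1 0 = p.2 := by
  intro p hp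
  exact PySem.Dict.getD_of_mem_items (PySem.Dict.mk grades) (k := p.1) (v := p.2)
    (by simpa using hp) (by simpa [PySem.Dict.keys] using h) 0

-- ===== VERDICT (by name: the statement is the Claim_ definition above) =====
theorem build_grades_spec : Claim_equal_build_grades := by
  intro grades _ hpre
  unfold Spec_build_grades
  have h1 := PySem.List.foldl_congr_mem' grades
    (fun revers p =>
      (if revers.contains ((PySem.Dict.mk grades).getD p.1 0) then revers
       else revers.insert ((PySem.Dict.mk grades).getD p.1 0) ([] : List String)).modify
        ((PySem.Dict.mk grades).getD p.1 0) [] (fun l => l ++ [p.1]))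
    (fun d p => d.modify p.2 [] (fun l => l ++ [p.1]))
    PySem.Dict.empty
    (fun p hp d => by
      simp only [lookup_eq grades hpre p hp]
      exact stepA_eq d p.2 p.1)
  show (List.foldl (fun revers p =>
      (if revers.contains ((PySem.Dict.mk grades).getD p.1 0) then revers
       else revers.insert ((PySem.Dict.mk grades).getD p.1 0) ([] : List String)).modify
        ((PySem.Dict.mk grades).getD p.1 0) [] (fun l => l ++ [p.1]))
      PySem.Dict.empty grades).items = build_grades_alt grades
  rw [h1]
  exact fold_simple_eq grades
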